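-- pv_equiv track=rewrite | github.com/joshvocal/Advent-of-Code-Solutions | 2015/day_05/solve.py | part2
-- ===== SOURCE A (Python) =====
-- def part2(lines):
--     def repeat_pair(letters):
--         for i in range(len(letters) - 1):
--             if letters.count(letters[i:i+2]) > 1:
--                 return True
--
--         return False
--
--     def repeat_exactly_one_letter_between(letters):
--         letters_len = len(letters) - 2
--
--         for i in range(letters_len):
--             if letters[i] == letters[i + 2]:
--                 return True
--
--         return False
--
--     count = 0
--
--     for line in lines:
--         repeat_exactly_one_letter_between_cond = repeat_exactly_one_letter_between(line)
--         repeat_pair_cond = repeat_pair(line)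
--
--         if (repeat_exactly_one_letter_between_cond and repeat_pair_cond):
--             count += 1
--
--     return count
-- ===== SOURCE B (Python) =====
-- def part2(lines):
--     total = 0
--     for line in lines:
--         n = len(line)
--         first = {}
--         has_pair = False
--         has_sandwich = False
--         for i in range(n - 1):
--             p = line[i:i+2]
--             if p in first:
--                 if i - first[p] >= 2:
--                     has_pair = True
--             else:
--                 first[p] = i
--             if i + 2 < n and line[i] == line[i + 2]:
--                 has_sandwich = True
--         if has_pair and has_sandwich:
--             total += 1
--     return total
-- ===== Notes on version B (the rewrite author's own statement) =====
-- stated objective: alternative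
-- what changed: A re-scans the whole string with str.count for every position (quadratic per line); B makes one pass per line keeping a dict of each 2-gram's first index and checks the non-overlapping repeat and the sandwich condition in the same pass (linear per line, but without A's early-return, so not measurably faster on the random timing inputs).
import Mathlib
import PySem

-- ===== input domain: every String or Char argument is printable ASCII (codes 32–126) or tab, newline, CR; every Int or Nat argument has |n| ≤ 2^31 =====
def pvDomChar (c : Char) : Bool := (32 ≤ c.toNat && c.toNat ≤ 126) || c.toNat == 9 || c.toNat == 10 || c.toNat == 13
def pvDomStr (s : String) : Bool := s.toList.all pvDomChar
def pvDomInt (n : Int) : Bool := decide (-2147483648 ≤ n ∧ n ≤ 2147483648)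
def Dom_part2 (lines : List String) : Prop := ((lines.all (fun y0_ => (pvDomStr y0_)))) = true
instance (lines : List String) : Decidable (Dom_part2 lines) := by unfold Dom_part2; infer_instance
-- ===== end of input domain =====

-- B replaces A's per-position str.count rescans by one pass per line with a dict of first 2-gram indices; equal return values are proved (neither mutates its input).

-- ===== PORT A =====
-- helper repeat_pair: for i in range(len-1): if letters.count(letters[i:i+2]) > 1: return True
def repeatPairA (letters : List Char) : Bool :=
  (PySem.List.pyRange 0 ((letters.length : Int) - 1) 1).any (fun i =>
    decide (PySem.Chars.count letters (PySem.List.slice letters (some i) (some (i + 2))) > 1))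

-- helper repeat_exactly_one_letter_between: for i in range(len-2): if letters[i] == letters[i+2]: return True
def repeatBetweenA (letters : List Char) : Bool :=
  (PySem.List.pyRange 0 ((letters.length : Int) - 2) 1).any (fun i =>
    PySem.List.pyGetD letters i 'a' == PySem.List.pyGetD letters (i + 2) 'a')

def part2 (lines : List String) : Int :=
  lines.foldl (fun count line =>
    let c1 := repeatBetweenA line.toList
    let c2 := repeatPairA line.toList
    if c1 && c2 then count + 1 else count) 0

-- ===== PORT B =====
-- one pass per line: dict `first` of each 2-gram's first index; pair repeat fires when i - first[p] >= 2
def niceB (s : List Char) : Bool × Bool :=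
  let n := s.length
  let st := (PySem.List.pyRange 0 ((n : Int) - 1) 1).foldl
    (fun (st : PySem.Dict (List Char) Int × Bool × Bool) i =>
      let p := PySem.List.slice s (some i) (some (i + 2))
      let sand := st.2.2 || (decide (i + 2 < (n : Int)) &&
        (PySem.List.pyGetD s i 'a' == PySem.List.pyGetD s (i + 2) 'a'))
      match st.1.get? p with
      | some j => (st.1, st.2.1 || decide (i - j ≥ 2), sand)
      | none => (st.1.insert p i, st.2.1, sand))
    (PySem.Dict.empty, false, false)
  (st.2.1, st.2.2)

def part2_alt (lines : List String) : Int :=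
  lines.foldl (fun total line =>
    let r := niceB line.toList
    if r.1 && r.2 then total + 1 else total) 0

-- ===== PRECONDITION & SPEC =====
def Spec_part2 (lines : List String) (out : Int) : Prop := out = part2_alt lines
instance (lines : List String) (out : Int) : Decidable (Spec_part2 lines out) := by unfold Spec_part2; infer_instance

-- ===== CLAIM (what is proved, stated in full; the proofs are below) =====
def Claim_equal_part2 : Prop := ∀ (lines : List String), Dom_part2 lines → Spec_part2 lines (part2 lines)

-- ===== LEMMAS AND PROOFS =====

-- the 2-gram starting at position i
def pairAt (s : List Char) (i : Nat) : List Char := (s.drop i).take 2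

-- "the line has two equal 2-grams at distance ≥ 2" (non-overlapping pair repeat)
def GoodPair (s : List Char) : Prop :=
  ∃ i j : Nat, i + 2 ≤ j ∧ j + 1 < s.length ∧ pairAt s i = pairAt s j

-- "the line has a letter repeated with exactly one letter between"
def GoodSand (s : List Char) : Prop :=
  ∃ i : Nat, i + 2 < s.length ∧ s[i]? = s[i + 2]?

-- greedy non-overlapping count of a fixed 2-gram [a,b]: the clean recursion behind Chars.count
def cnt2 (a b : Char) : List Char → Nat
  | [] => 0
  | [_] => 0
  | c :: d :: t => if c = a ∧ d = b then 1 + cnt2 a b t else cnt2 a b (d :: t)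

theorem count_go_nil (p : List Char) (fuel acc : Nat) :
    PySem.Chars.count.go p fuel [] acc = acc := by
  cases fuel <;> simp [PySem.Chars.count.go]

theorem count_go_eq_cnt2 (a b : Char) : ∀ (fuel : Nat) (l : List Char) (acc : Nat),
    l.length ≤ fuel → PySem.Chars.count.go [a, b] fuel l acc = acc + cnt2 a b l := by
  intro fuel
  induction fuel with
  | zero =>
      intro l acc h
      have : l = [] := List.eq_nil_of_length_eq_zero (Nat.le_zero.mp h)
      subst this
      simp [count_go_nil, cnt2]
  | succ f ih =>
      intro l acc h
      match l with
      | [] => simp [count_go_nil, cnt2]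
      | [c] =>
          simp only [PySem.Chars.count.go, cnt2]
          have hpre : [a, b].isPrefixOf [c] = false := by
            cases hab : [a,b].isPrefixOf [c]
            · rfl
            · have := (List.isPrefixOf_iff_prefix.mp hab).length_le
              simp at this
          rw [hpre]
          simp [count_go_nil]
      | c :: d :: t =>
          simp only [PySem.Chars.count.go, cnt2]
          by_cases hcd : c = a ∧ d = b
          · have hpre : [a, b].isPrefixOf (c :: d :: t) = true := by
              rw [List.isPrefixOf_iff_prefix]
              exact ⟨t, by simp [hcd.1, hcd.2]⟩
            rw [hpre]
            simp only [if_pos hcd, if_true]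
            show PySem.Chars.count.go [a, b] f (List.drop 2 (c :: d :: t)) (acc + 1) = acc + (1 + cnt2 a b t)
            simp only [List.drop_succ_cons, List.drop_zero]
            rw [ih t (acc + 1) (by simp at h; omega)]
            omega
          · have hpre : [a, b].isPrefixOf (c :: d :: t) = false := by
              cases hab : [a,b].isPrefixOf (c :: d :: t)
              · rfl
              · obtain ⟨r, hr⟩ := List.isPrefixOf_iff_prefix.mp hab
                simp at hr
                exact absurd ⟨hr.1.symm, hr.2.1.symm⟩ hcd
            rw [hpre]
            simp only [if_neg hcd, Bool.false_eq_true, if_false]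
            exact ih (d :: t) acc (by simp at h ⊢; omega)

theorem count_pair_eq_cnt2 (a b : Char) (s : List Char) :
    PySem.Chars.count s [a, b] = cnt2 a b s := by
  rw [PySem.Chars.count]
  simp only [List.isEmpty_cons, if_false, Bool.false_eq_true]
  rw [count_go_eq_cnt2 a b s.length s 0 le_rfl, Nat.zero_add]

theorem not_prefix_pair_short (a b : Char) (l : List Char) (h : l.length ≤ 1) :
    ¬ [a, b] <+: l := by
  intro hp
  have := hp.length_le
  simp at this
  omega

theorem not_prefix_pair_head {a b c d : Char} (t : List Char) (hcd : ¬(c = a ∧ d = b)) :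
    ¬ [a, b] <+: (c :: d :: t) := by
  rintro ⟨r, hr⟩
  simp only [List.cons_append, List.nil_append, List.cons.injEq] at hr
  exact hcd ⟨hr.1.symm, hr.2.1.symm⟩

theorem prefix_pair_iff (a b : Char) (s : List Char) (u : Nat) :
    [a, b] <+: s.drop u ↔ u + 1 < s.length ∧ pairAt s u = [a, b] := by
  rw [List.prefix_iff_eq_take]
  unfold pairAt
  constructor
  · intro h
    have hl := congrArg List.length h
    simp only [List.length_take, List.length_drop, List.length_cons, List.length_nil] at hl
    exact ⟨by omega, h.symm⟩
  · rintro ⟨h1, h2⟩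
    exact h2.symm

theorem cnt2_ge_one_iff (a b : Char) (s : List Char) :
    1 ≤ cnt2 a b s ↔ ∃ u : Nat, [a, b] <+: s.drop u := by
  induction s using cnt2.induct a b with
  | case1 =>
      simp only [cnt2, List.drop_nil]
      constructor
      · omega
      · rintro ⟨u, hu⟩
        exact absurd hu (not_prefix_pair_short a b [] (by simp))
  | case2 c =>
      simp only [cnt2]
      constructor
      · omega
      · rintro ⟨u, hu⟩
        exact absurd hu (not_prefix_pair_short a b _ (by simp [List.length_drop]))
  | case3 c d t hcd ih =>
      obtain ⟨rfl, rfl⟩ := hcd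
      rw [cnt2, if_pos ⟨rfl, rfl⟩]
      constructor
      · intro _
        exact ⟨0, ⟨t, rfl⟩⟩
      · intro _
        omega
  | case4 c d t hcd ih =>
      rw [cnt2, if_neg hcd, ih]
      constructor
      · rintro ⟨u, hu⟩
        exact ⟨u + 1, by simpa using hu⟩
      · rintro ⟨u, hu⟩
        match u with
        | 0 => exact absurd (by simpa using hu) (not_prefix_pair_head t hcd)
        | v + 1 => exact ⟨v, by simpa using hu⟩

theorem cnt2_ge_two_iff (a b : Char) (s : List Char) :
    2 ≤ cnt2 a b s ↔ ∃ u v : Nat, u + 2 ≤ v ∧ [a, b] <+: s.drop u ∧ [a, b] <+: s.drop v := by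
  induction s using cnt2.induct a b with
  | case1 =>
      simp only [cnt2, List.drop_nil]
      constructor
      · omega
      · rintro ⟨u, v, _, hu, _⟩
        exact absurd hu (not_prefix_pair_short a b [] (by simp))
  | case2 c =>
      simp only [cnt2]
      constructor
      · omega
      · rintro ⟨u, v, _, hu, _⟩
        exact absurd hu (not_prefix_pair_short a b _ (by simp [List.length_drop]))
  | case3 c d t hcd ih =>
      obtain ⟨rfl, rfl⟩ := hcd
      rw [cnt2, if_pos ⟨rfl, rfl⟩, show (2 ≤ 1 + cnt2 c d t ↔ 1 ≤ cnt2 c d t) from by omega,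
        cnt2_ge_one_iff]
      constructor
      · rintro ⟨k, hk⟩
        exact ⟨0, k + 2, by omega, ⟨t, rfl⟩, by simpa using hk⟩
      · rintro ⟨u, v, huv, hu, hv⟩
        have hv2 : 2 ≤ v := by omega
        match v, hv2 with
        | w + 2, _ => exact ⟨w, by simpa using hv⟩
  | case4 c d t hcd ih =>
      rw [cnt2, if_neg hcd, ih]
      constructor
      · rintro ⟨u, v, huv, hu, hv⟩
        exact ⟨u + 1, v + 1, by omega, by simpa using hu, by simpa using hv⟩
      · rintro ⟨u, v, huv, hu, hv⟩
        match u with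
        | 0 => exact absurd (by simpa using hu) (not_prefix_pair_head t hcd)
        | w + 1 =>
            have hv1 : 1 ≤ v := by omega
            match v, hv1 with
            | x + 1, _ =>
                exact ⟨w, x, by omega, by simpa using hu, by simpa using hv⟩

theorem pairAt_eq (s : List Char) (u : Nat) (h : u + 1 < s.length) :
    pairAt s u = [s[u], s[u + 1]] := by
  unfold pairAt
  have h1 : s.drop u = s[u] :: s.drop (u + 1) := List.drop_eq_getElem_cons (by omega)
  have h2 : s.drop (u + 1) = s[u + 1] :: s.drop (u + 2) := List.drop_eq_getElem_cons (by omega)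
  rw [h1, h2]
  rfl

theorem count_pairAt_gt_one_iff (s : List Char) (u : Nat) (h : u + 1 < s.length) :
    1 < PySem.Chars.count s (pairAt s u) ↔
      ∃ p q : Nat, p + 2 ≤ q ∧ q + 1 < s.length ∧ pairAt s p = pairAt s u ∧ pairAt s q = pairAt s u := by
  rw [pairAt_eq s u h, count_pair_eq_cnt2,
    show (1 < cnt2 s[u] s[u+1] s ↔ 2 ≤ cnt2 s[u] s[u+1] s) from by omega, cnt2_ge_two_iff]
  constructor
  · rintro ⟨p, q, hpq, hp, hq⟩
    rw [prefix_pair_iff] at hp hq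
    exact ⟨p, q, hpq, by omega, hp.2, hq.2⟩
  · rintro ⟨p, q, hpq, hq1, hp, hq⟩
    refine ⟨p, q, hpq, ?_, ?_⟩
    · rw [prefix_pair_iff]
      exact ⟨by omega, hp⟩
    · rw [prefix_pair_iff]
      exact ⟨by omega, hq⟩

theorem repeatPairA_iff (s : List Char) : repeatPairA s = true ↔ GoodPair s := by
  unfold repeatPairA
  rw [List.any_eq_true]
  constructor
  · rintro ⟨i, hmem, hi⟩
    rw [PySem.List.mem_pyRange_one] at hmem
    obtain ⟨h0, h1⟩ := hmem
    set u := i.toNat with hu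
    have hiu : i = (u : Int) := by omega
    have hun : u + 1 < s.length := by omega
    rw [hiu, show (u : Int) + 2 = ((u + 2 : Nat) : Int) from by push_cast; ring,
      PySem.List.slice_natCast] at hi
    simp only [decide_eq_true_eq] at hi
    have hsl : List.take (u + 2 - u) (List.drop u s) = pairAt s u := by
      unfold pairAt; congr 1; omega
    rw [hsl] at hi
    obtain ⟨p, q, hpq, hq1, hp, hq⟩ := (count_pairAt_gt_one_iff s u hun).mp hi
    exact ⟨p, q, hpq, hq1, by rw [hp, hq]⟩
  · rintro ⟨p, q, hpq, hq1, hpair⟩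
    refine ⟨(p : Int), ?_, ?_⟩
    · rw [PySem.List.mem_pyRange_one]; omega
    · have hpn : p + 1 < s.length := by omega
      rw [show (p : Int) + 2 = ((p + 2 : Nat) : Int) from by push_cast; ring,
        PySem.List.slice_natCast]
      simp only [decide_eq_true_eq]
      have hsl : List.take (p + 2 - p) (List.drop p s) = pairAt s p := by
        unfold pairAt; congr 1; omega
      rw [hsl]
      exact (count_pairAt_gt_one_iff s p hpn).mpr ⟨p, q, hpq, hq1, rfl, hpair.symm⟩

theorem repeatBetweenA_iff (s : List Char) : repeatBetweenA s = true ↔ GoodSand s := by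
  unfold repeatBetweenA
  rw [List.any_eq_true]
  constructor
  · rintro ⟨i, hmem, hi⟩
    rw [PySem.List.mem_pyRange_one] at hmem
    obtain ⟨h0, h1⟩ := hmem
    set u := i.toNat with hu
    have hiu : i = (u : Int) := by omega
    have hun : u + 2 < s.length := by omega
    rw [hiu, PySem.List.pyGetD_eq_getElem s 'a' (by omega) (by omega),
      show (u : Int) + 2 = ((u + 2 : Nat) : Int) from by push_cast; ring,
      PySem.List.pyGetD_eq_getElem s 'a' (by omega) (by push_cast; omega)] at hi
    simp only [Int.toNat_natCast, beq_iff_eq] at hi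
    refine ⟨u, hun, ?_⟩
    rw [List.getElem?_eq_getElem (by omega), List.getElem?_eq_getElem (by omega)]
    simpa using hi
  · rintro ⟨u, hun, hval⟩
    refine ⟨(u : Int), ?_, ?_⟩
    · rw [PySem.List.mem_pyRange_one]; omega
    · rw [PySem.List.pyGetD_eq_getElem s 'a' (by omega) (by omega),
        show (u : Int) + 2 = ((u + 2 : Nat) : Int) from by push_cast; ring,
        PySem.List.pyGetD_eq_getElem s 'a' (by omega) (by push_cast; omega)]
      simp only [Int.toNat_natCast, beq_iff_eq]
      rw [List.getElem?_eq_getElem (by omega), List.getElem?_eq_getElem (by omega)] at hval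
      simpa using hval

-- step function of B's per-line loop (definitionally the lambda in niceB)
def gB (s : List Char) (st : PySem.Dict (List Char) Int × Bool × Bool) (i : Int) :
    PySem.Dict (List Char) Int × Bool × Bool :=
  let p := PySem.List.slice s (some i) (some (i + 2))
  let sand := st.2.2 || (decide (i + 2 < (s.length : Int)) &&
    (PySem.List.pyGetD s i 'a' == PySem.List.pyGetD s (i + 2) 'a'))
  match st.1.get? p with
  | some j => (st.1, st.2.1 || decide (i - j ≥ 2), sand)
  | none => (st.1.insert p i, st.2.1, sand)

theorem slice_pairAt (s : List Char) (u : Nat) :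
    PySem.List.slice s (some (u : Int)) (some ((u : Int) + 2)) = pairAt s u := by
  rw [show (u : Int) + 2 = ((u + 2 : Nat) : Int) from by push_cast; ring,
    PySem.List.slice_natCast]
  unfold pairAt
  congr 1
  omega

theorem find?_range_eq_some {p : Nat → Prop} [DecidablePred p] {k u : Nat}
    (h : (List.range k).find? (fun x => decide (p x)) = some u) :
    u < k ∧ p u ∧ ∀ v < u, ¬ p v := by
  obtain ⟨hpu, as, bs, heq, has⟩ := List.find?_eq_some_iff_append.mp h
  have hu : u < k := by
    have : u ∈ List.range k := by rw [heq]; simp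
    simpa using this
  have hlen : as.length < k := by
    have := congrArg List.length heq
    simp at this
    omega
  have huas : u = as.length := by
    have h1 : (List.range k)[as.length]? = some as.length := by
      simp [hlen]
    have h2 : (as ++ u :: bs)[as.length]? = some u := by
      rw [List.getElem?_append_right le_rfl]
      simp
    rw [heq, h2] at h1
    exact Option.some_inj.mp h1
  have hasr : as = List.range u := by
    have : as = (as ++ u :: bs).take as.length := by simp
    rw [← heq] at this
    rw [this, List.take_range, huas]
    congr 1
    omega
  refine ⟨hu, by simpa using hpu, fun v hv hpv => ?_⟩
  have : v ∈ as := by rw [hasr]; simpa using by omega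
  have := has v this
  simp at this
  exact this hpv

theorem find?_range_eq_none {p : Nat → Prop} [DecidablePred p] {k : Nat}
    (h : (List.range k).find? (fun x => decide (p x)) = none) :
    ∀ v < k, ¬ p v := by
  intro v hv hpv
  have := List.find?_eq_none.mp h v (by simpa using hv)
  simp at this
  exact this hpv

theorem invB (s : List Char) (k : Nat) (hk : k ≤ s.length - 1) :
    (∀ p, ((List.range k).foldl (fun st (u : Nat) => gB s st (u : Int)) (PySem.Dict.empty, false, false)).1.get? p
        = ((List.range k).find? (fun u => decide (pairAt s u = p))).map (fun (u : Nat) => (u : Int)))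
    ∧ ((List.range k).foldl (fun st (u : Nat) => gB s st (u : Int)) (PySem.Dict.empty, false, false)).2.1
        = decide (∃ v < k, ∃ u < v, u + 2 ≤ v ∧ pairAt s u = pairAt s v)
    ∧ ((List.range k).foldl (fun st (u : Nat) => gB s st (u : Int)) (PySem.Dict.empty, false, false)).2.2
        = decide (∃ u < k, u + 2 < s.length ∧ s[u]? = s[u + 2]?) := by
  induction k with
  | zero =>
      refine ⟨fun p => ?_, ?_, ?_⟩ <;> simp [PySem.Dict.get?_empty]
  | succ k ih =>
      have hk' : k ≤ s.length - 1 := by omega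
      obtain ⟨ihD, ihP, ihS⟩ := ih hk'
      have hkn : k + 2 ≤ s.length := by omega
      rw [List.range_succ] at *
      simp only [List.foldl_append, List.foldl_cons, List.foldl_nil] at *
      set st := (List.range k).foldl (fun st (u : Nat) => gB s st (u : Int)) (PySem.Dict.empty, false, false) with hst
      rw [show (gB s st (k : Int)) = _ from rfl]
      unfold gB
      simp only [slice_pairAt]
      have hsand : (st.2.2 || (decide ((k : Int) + 2 < (s.length : Int)) &&
          (PySem.List.pyGetD s (k : Int) 'a' == PySem.List.pyGetD s ((k : Int) + 2) 'a')))
          = decide (∃ u < k + 1, u + 2 < s.length ∧ s[u]? = s[u + 2]?) := by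
        rw [ihS]
        have heq : (decide ((k : Int) + 2 < (s.length : Int)) &&
            (PySem.List.pyGetD s (k : Int) 'a' == PySem.List.pyGetD s ((k : Int) + 2) 'a'))
            = decide (k + 2 < s.length ∧ s[k]? = s[k + 2]?) := by
          by_cases hlt : k + 2 < s.length
          · rw [PySem.List.pyGetD_eq_getElem s 'a' (by omega) (by omega),
              show (k : Int) + 2 = ((k + 2 : Nat) : Int) from by push_cast; ring,
              PySem.List.pyGetD_eq_getElem s 'a' (by omega) (by push_cast; omega)]
            simp only [Int.toNat_natCast]
            rw [List.getElem?_eq_getElem (by omega), List.getElem?_eq_getElem (by omega)]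
            rw [Bool.beq_eq_decide_eq, ← Bool.decide_and]
            apply decide_eq_decide.mpr
            simp only [Option.some_inj]
            constructor
            · rintro ⟨_, h⟩; exact ⟨hlt, h⟩
            · rintro ⟨_, h⟩; exact ⟨by push_cast; omega, h⟩
          · have h1 : decide ((k : Int) + 2 < (s.length : Int)) = false := by
              simp; omega
            have h2 : decide (k + 2 < s.length ∧ s[k]? = s[k + 2]?) = false := by
              simp; omega
            rw [h1, h2, Bool.false_and]
        rw [heq, ← Bool.decide_or _ _]
        apply decide_eq_decide.mpr
        constructor
        · rintro (⟨u, hu, h⟩ | h)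
          · exact ⟨u, by omega, h⟩
          · exact ⟨k, by omega, h⟩
        · rintro ⟨u, hu, h⟩
          by_cases huk : u < k
          · exact Or.inl ⟨u, huk, h⟩
          · have : u = k := by omega
            subst this
            exact Or.inr h
      cases hfind : st.1.get? (pairAt s k) with
      | some j =>
          rw [ihD] at hfind
          obtain ⟨u0, hfu, hju⟩ := Option.map_eq_some_iff.mp hfind
          obtain ⟨hu0k, hu0p, hu0min⟩ := find?_range_eq_some hfu
          refine ⟨fun p => ?_, ?_, by simpa using hsand⟩
          · show st.1.get? p = _
            rw [ihD, List.find?_append]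
            cases hf : (List.range k).find? (fun u => decide (pairAt s u = p)) with
            | some w => simp
            | none =>
                simp only [Option.none_or]
                cases hpk : decide (pairAt s k = p) with
                | false => simp [List.find?, hpk]
                | true =>
                    exfalso
                    have hpkp : pairAt s k = p := of_decide_eq_true hpk
                    have := find?_range_eq_none hf u0 hu0k
                    rw [hpkp] at hu0p
                    exact this hu0p
          · show (st.2.1 || decide ((k : Int) - j ≥ 2)) = _
            rw [ihP, ← hju]
            have hx : decide ((k : Int) - (u0 : Int) ≥ 2) = decide (u0 + 2 ≤ k) := by
              apply decide_eq_decide.mpr; omega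
            rw [hx, ← Bool.decide_or _ _]
            apply decide_eq_decide.mpr
            constructor
            · rintro (⟨v, hv, h⟩ | h)
              · exact ⟨v, by omega, h⟩
              · exact ⟨k, by omega, u0, by omega, by omega, hu0p⟩
            · rintro ⟨v, hv, u, hu, h2, hp⟩
              by_cases hvk : v < k
              · exact Or.inl ⟨v, hvk, u, hu, h2, hp⟩
              · have : v = k := by omega
                subst this
                right
                by_contra hlt
                push Not at hlt
                have : u < u0 := by omega
                exact (hu0min u this) hp
      | none =>
          rw [ihD] at hfind
          have hfnone : (List.range k).find? (fun u => decide (pairAt s u = pairAt s k)) = none := by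
            cases hf : (List.range k).find? (fun u => decide (pairAt s u = pairAt s k)) with
            | none => rfl
            | some w => rw [hf] at hfind; simp at hfind
          have hnone := find?_range_eq_none hfnone
          refine ⟨fun p => ?_, ?_, by simpa using hsand⟩
          · show (st.1.insert (pairAt s k) (k : Int)).get? p = _
            rw [List.find?_append]
            by_cases hpk : pairAt s k = p
            · subst hpk
              rw [PySem.Dict.get?_insert_self, hfnone]
              simp [List.find?]
            · rw [PySem.Dict.get?_insert_of_ne _ _ (fun h => hpk h.symm), ihD]
              cases hf : (List.range k).find? (fun u => decide (pairAt s u = p)) with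
              | some w => simp
              | none =>
                  simp only [Option.none_or]
                  have : decide (pairAt s k = p) = false := by simp [hpk]
                  simp [List.find?, this]
          · show st.2.1 = _
            rw [ihP]
            apply decide_eq_decide.mpr
            constructor
            · rintro ⟨v, hv, h⟩
              exact ⟨v, by omega, h⟩
            · rintro ⟨v, hv, u, hu, h2, hp⟩
              by_cases hvk : v < k
              · exact ⟨v, hvk, u, hu, h2, hp⟩
              · exfalso
                have : v = k := by omega
                subst this
                exact (hnone u (by omega)) hp

theorem niceB_def (s : List Char) : niceB s =
    (((PySem.List.pyRange 0 ((s.length : Int) - 1) 1).foldl (fun st i => gB s st i)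
        (PySem.Dict.empty, false, false)).2.1,
      ((PySem.List.pyRange 0 ((s.length : Int) - 1) 1).foldl (fun st i => gB s st i)
        (PySem.Dict.empty, false, false)).2.2) := rfl

theorem niceB_fst_iff (s : List Char) : (niceB s).1 = true ↔ GoodPair s := by
  rw [niceB_def]
  have h1 : (PySem.List.pyRange 0 ((s.length : Int) - 1) 1)
      = (List.range (s.length - 1)).map (fun (u : Nat) => (u : Int)) := by
    rw [PySem.List.pyRange_one]
    have ht : ((s.length : Int) - 1 - 0).toNat = s.length - 1 := by omega
    rw [ht]
    simp
  rw [h1, List.foldl_map]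
  obtain ⟨_, hP, _⟩ := invB s (s.length - 1) le_rfl
  show ((List.range (s.length - 1)).foldl (fun st (u : Nat) => gB s st (u : Int)) (PySem.Dict.empty, false, false)).2.1 = true ↔ GoodPair s
  rw [hP, decide_eq_true_eq]
  constructor
  · rintro ⟨v, hv, u, _, h2, hp⟩
    exact ⟨u, v, h2, by omega, hp⟩
  · rintro ⟨i, j, h2, hj, hp⟩
    exact ⟨j, by omega, i, by omega, h2, hp⟩

theorem niceB_snd_iff (s : List Char) : (niceB s).2 = true ↔ GoodSand s := by
  rw [niceB_def]
  have h1 : (PySem.List.pyRange 0 ((s.length : Int) - 1) 1)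
      = (List.range (s.length - 1)).map (fun (u : Nat) => (u : Int)) := by
    rw [PySem.List.pyRange_one]
    have ht : ((s.length : Int) - 1 - 0).toNat = s.length - 1 := by omega
    rw [ht]
    simp
  rw [h1, List.foldl_map]
  obtain ⟨_, _, hS⟩ := invB s (s.length - 1) le_rfl
  show ((List.range (s.length - 1)).foldl (fun st (u : Nat) => gB s st (u : Int)) (PySem.Dict.empty, false, false)).2.2 = true ↔ GoodSand s
  rw [hS, decide_eq_true_eq]
  constructor
  · rintro ⟨u, _, h2, hp⟩
    exact ⟨u, h2, hp⟩
  · rintro ⟨u, h2, hp⟩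
    exact ⟨u, by omega, h2, hp⟩

-- ===== VERDICT (by name: the statement is the Claim_ definition above) =====
theorem part2_spec : Claim_equal_part2 := by
  intro lines _
  show part2 lines = part2_alt lines
  unfold part2 part2_alt
  have hfun : (fun (count : Int) (line : String) =>
      let c1 := repeatBetweenA line.toList
      let c2 := repeatPairA line.toList
      if c1 && c2 then count + 1 else count) =
      (fun (total : Int) (line : String) =>
      let r := niceB line.toList
      if r.1 && r.2 then total + 1 else total) := by
    funext count line
    have hb : (repeatBetweenA line.toList && repeatPairA line.toList)
        = ((niceB line.toList).1 && (niceB line.toList).2) := by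
      apply Bool.coe_iff_coe.mp
      simp only [Bool.and_eq_true, repeatBetweenA_iff, repeatPairA_iff, niceB_fst_iff, niceB_snd_iff]
      exact and_comm
    show (if repeatBetweenA line.toList && repeatPairA line.toList then count + 1 else count)
        = (if (niceB line.toList).1 && (niceB line.toList).2 then count + 1 else count)
    rw [hb]
  rw [hfun]
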